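-- pv_equiv track=rewrite | github.com/blacksmithalex/leetcode | Algorithms/easy/1189. Maximum Number of Balloons.py | maxNumberOfBalloons
-- ===== SOURCE A (Python) =====
-- def maxNumberOfBalloons(text):
--     """
--     :type text: str
--     :rtype: int
--     """
--     freq = {'b': 0, 'a': 0, 'l': 0, 'o': 0, 'n': 0}
--     for x in text:
--         if x in freq:
--             freq[x] += 1
--     freq['l'] //= 2
--     freq['o'] //= 2
--     return min(freq.values())
-- ===== SOURCE B (Python) =====
-- def maxNumberOfBalloons(text):
--     def can(k):
--         return (text.count('b') >= k and text.count('a') >= k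
--                 and text.count('l') >= 2 * k and text.count('o') >= 2 * k
--                 and text.count('n') >= k)
--     lo, hi = 0, len(text) // 7
--     while lo < hi:
--         mid = (lo + hi + 1) // 2
--         if can(mid):
--             lo = mid
--         else:
--             hi = mid - 1
--     return lo
-- ===== Notes on version B (the rewrite author's own statement) =====
-- stated objective: alternative
-- what changed: Replaces A's single counting pass + min over a frequency dict with a binary search on the answer k over [0, len(text)//7], driven by a feasibility predicate can(k) that re-scans the text; no minimum is ever computed.
import Mathlib
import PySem

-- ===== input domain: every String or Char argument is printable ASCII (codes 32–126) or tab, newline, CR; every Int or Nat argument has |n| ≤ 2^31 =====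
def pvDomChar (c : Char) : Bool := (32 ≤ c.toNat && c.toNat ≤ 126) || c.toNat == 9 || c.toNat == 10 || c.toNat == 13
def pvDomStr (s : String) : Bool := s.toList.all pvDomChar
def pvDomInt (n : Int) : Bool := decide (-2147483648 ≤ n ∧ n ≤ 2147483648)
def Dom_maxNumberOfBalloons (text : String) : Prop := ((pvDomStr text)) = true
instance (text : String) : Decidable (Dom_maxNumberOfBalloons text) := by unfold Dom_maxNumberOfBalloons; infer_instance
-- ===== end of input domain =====

-- B replaces A's frequency-dict pass + min with a binary search on the answer k, guided by a feasibility test "can k balloons be formed"; alternative algorithm, not claimed faster.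


-- ===== PORT A =====
-- the loop body: 'if x in freq: freq[x] += 1'
def pvStepA (d : PySem.Dict Char Int) (x : Char) : PySem.Dict Char Int :=
  if d.contains x then d.modify x 0 (· + 1) else d

def maxNumberOfBalloons (text : String) : Int :=
  let freq0 : PySem.Dict Char Int :=
    PySem.Dict.ofList [('b', 0), ('a', 0), ('l', 0), ('o', 0), ('n', 0)]
  let freq1 := text.toList.foldl pvStepA freq0
  let freq2 := freq1.modify 'l' 0 (fun v => PySem.Int.floordiv v 2)   -- freq['l'] //= 2
  let freq3 := freq2.modify 'o' 0 (fun v => PySem.Int.floordiv v 2)   -- freq['o'] //= 2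
  match PySem.List.min? freq3.values (fun y => y) with                -- min(freq.values()); dict is never empty
  | some m => m
  | none => 0

-- ===== PORT B =====
-- 'def can(k): …' — feasibility: can k balloons be formed?
def pvCan (text : String) (k : Int) : Bool :=
  decide ((PySem.Str.count text "b" : Int) ≥ k) &&
  decide ((PySem.Str.count text "a" : Int) ≥ k) &&
  decide ((PySem.Str.count text "l" : Int) ≥ 2 * k) &&
  decide ((PySem.Str.count text "o" : Int) ≥ 2 * k) &&
  decide ((PySem.Str.count text "n" : Int) ≥ k)

-- midpoint bounds, cited by pvSearch's decreasing_by
theorem pvMid_bounds {lo hi : Int} (h : lo < hi) :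
    lo < PySem.Int.floordiv (lo + hi + 1) 2 ∧ PySem.Int.floordiv (lo + hi + 1) 2 ≤ hi := by
  rw [PySem.Int.floordiv_eq_ediv_of_pos (by norm_num)]
  omega

-- the 'while lo < hi' loop; 'mid = (lo + hi + 1) // 2'
def pvSearch (text : String) (lo hi : Int) : Int :=
  if h : lo < hi then
    if pvCan text (PySem.Int.floordiv (lo + hi + 1) 2) then
      pvSearch text (PySem.Int.floordiv (lo + hi + 1) 2) hi
    else
      pvSearch text lo (PySem.Int.floordiv (lo + hi + 1) 2 - 1)
  else lo
termination_by (hi - lo).toNat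
decreasing_by
  · have := pvMid_bounds h; omega
  · have := pvMid_bounds h; omega

def maxNumberOfBalloons_alt (text : String) : Int :=
  pvSearch text 0 (PySem.Int.floordiv (PySem.Str.len text) 7)   -- lo, hi = 0, len(text) // 7

-- ===== PRECONDITION & SPEC =====
def Spec_maxNumberOfBalloons (text : String) (out : Int) : Prop := out = maxNumberOfBalloons_alt text
instance (text : String) (out : Int) : Decidable (Spec_maxNumberOfBalloons text out) := by unfold Spec_maxNumberOfBalloons; infer_instance

-- ===== CLAIM (what is proved, stated in full; the proofs are below) =====
def Claim_equal_maxNumberOfBalloons : Prop := ∀ (text : String), Dom_maxNumberOfBalloons text → Spec_maxNumberOfBalloons text (maxNumberOfBalloons text)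

-- ===== LEMMAS AND PROOFS =====

-- the common value both programs compute: min(#b, #a, #l//2, #o//2, #n)
def pvM (l : List Char) : Nat :=
  min (min (min (min (l.count 'b') (l.count 'a')) (l.count 'l' / 2)) (l.count 'o' / 2)) (l.count 'n')

-- A's accumulation loop over the literal five-key dict computed in closed form.
theorem pvLoopA_eq (l : List Char) : ∀ (b a ll o n : Int),
    l.foldl pvStepA (PySem.Dict.mk [('b',b),('a',a),('l',ll),('o',o),('n',n)]) =
    PySem.Dict.mk [('b', b + l.count 'b'), ('a', a + l.count 'a'), ('l', ll + l.count 'l'),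
                   ('o', o + l.count 'o'), ('n', n + l.count 'n')] := by
  induction l with
  | nil => simp
  | cons x t ih =>
    intro b a ll o n
    simp only [List.foldl_cons, List.count_cons]
    by_cases hb : x = 'b'
    · subst hb
      rw [show pvStepA (PySem.Dict.mk [('b',b),('a',a),('l',ll),('o',o),('n',n)]) 'b'
            = PySem.Dict.mk [('b',b+1),('a',a),('l',ll),('o',o),('n',n)] from by
          simp [pvStepA, PySem.Dict.contains, PySem.Dict.modify, PySem.Dict.insert,
                PySem.Dict.getD, PySem.Dict.get?], ih]
      simp; ring
    · by_cases ha : x = 'a'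
      · subst ha
        rw [show pvStepA (PySem.Dict.mk [('b',b),('a',a),('l',ll),('o',o),('n',n)]) 'a'
              = PySem.Dict.mk [('b',b),('a',a+1),('l',ll),('o',o),('n',n)] from by
            simp [pvStepA, PySem.Dict.contains, PySem.Dict.modify, PySem.Dict.insert,
                  PySem.Dict.getD, PySem.Dict.get?], ih]
        simp; ring
      · by_cases hl : x = 'l'
        · subst hl
          rw [show pvStepA (PySem.Dict.mk [('b',b),('a',a),('l',ll),('o',o),('n',n)]) 'l'
                = PySem.Dict.mk [('b',b),('a',a),('l',ll+1),('o',o),('n',n)] from by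
              simp [pvStepA, PySem.Dict.contains, PySem.Dict.modify, PySem.Dict.insert,
                    PySem.Dict.getD, PySem.Dict.get?], ih]
          simp; ring
        · by_cases ho : x = 'o'
          · subst ho
            rw [show pvStepA (PySem.Dict.mk [('b',b),('a',a),('l',ll),('o',o),('n',n)]) 'o'
                  = PySem.Dict.mk [('b',b),('a',a),('l',ll),('o',o+1),('n',n)] from by
                simp [pvStepA, PySem.Dict.contains, PySem.Dict.modify, PySem.Dict.insert,
                      PySem.Dict.getD, PySem.Dict.get?], ih]
            simp; ring
          · by_cases hn : x = 'n'
            · subst hn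
              rw [show pvStepA (PySem.Dict.mk [('b',b),('a',a),('l',ll),('o',o),('n',n)]) 'n'
                    = PySem.Dict.mk [('b',b),('a',a),('l',ll),('o',o),('n',n+1)] from by
                  simp [pvStepA, PySem.Dict.contains, PySem.Dict.modify, PySem.Dict.insert,
                        PySem.Dict.getD, PySem.Dict.get?], ih]
              simp; ring
            · rw [show pvStepA (PySem.Dict.mk [('b',b),('a',a),('l',ll),('o',o),('n',n)]) x
                    = PySem.Dict.mk [('b',b),('a',a),('l',ll),('o',o),('n',n)] from by
                  simp [pvStepA, PySem.Dict.contains, Ne.symm hb, Ne.symm ha,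
                        Ne.symm hl, Ne.symm ho, Ne.symm hn], ih]
              simp [hb, ha, hl, ho, hn]

-- str.count with a one-character needle counts single characters.
theorem pvCountGo_single (c : Char) : ∀ (fuel : ℕ) (l : List Char) (acc : ℕ),
    l.length ≤ fuel → PySem.Chars.count.go [c] fuel l acc = acc + l.count c := by
  intro fuel
  induction fuel with
  | zero =>
    intro l acc h
    have : l = [] := List.eq_nil_of_length_eq_zero (Nat.le_zero.mp h)
    subst this; simp [PySem.Chars.count.go]
  | succ f ih =>
    intro l acc h
    cases l with
    | nil => simp [PySem.Chars.count.go]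
    | cons x t =>
      simp only [PySem.Chars.count.go]
      by_cases hx : c = x
      · subst hx
        rw [if_pos (by simp), show List.drop (List.length [c]) (c :: t) = t from by simp,
            ih t (acc + 1) (by simpa using h)]
        simp
        omega
      · rw [if_neg (by simp [hx])]
        rw [ih t acc (by simpa using h)]
        simp [Ne.symm hx]

theorem pvCount_single (s : String) (c : Char) :
    PySem.Str.count s (String.ofList [c]) = s.toList.count c := by
  rw [PySem.Str.count]
  simp only [String.toList_ofList]
  rw [PySem.Chars.count, if_neg (by simp), pvCountGo_single c _ _ _ (le_refl _)]
  omega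

-- A returns the min formula.
theorem pvA_eq (text : String) : maxNumberOfBalloons text = (pvM text.toList : Int) := by
  have hA : maxNumberOfBalloons text =
      match PySem.List.min?
        ((((text.toList.foldl pvStepA
              (PySem.Dict.mk [('b',(0:Int)),('a',0),('l',0),('o',0),('n',0)])).modify 'l' 0
            (fun v => PySem.Int.floordiv v 2)).modify 'o' 0
            (fun v => PySem.Int.floordiv v 2)).values) (fun y => y) with
      | some m => m
      | none => 0 := rfl
  rw [hA, pvLoopA_eq]
  simp only [zero_add]
  rw [show ∀ (b a ll o n : Int),
        ((PySem.Dict.mk [('b',b),('a',a),('l',ll),('o',o),('n',n)]).modify 'l' 0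
          (fun v => PySem.Int.floordiv v 2))
        = PySem.Dict.mk [('b',b),('a',a),('l',PySem.Int.floordiv ll 2),('o',o),('n',n)] from by
      intro b a ll o n
      simp [PySem.Dict.modify, PySem.Dict.insert, PySem.Dict.getD, PySem.Dict.get?]]
  rw [show ∀ (b a ll o n : Int),
        ((PySem.Dict.mk [('b',b),('a',a),('l',ll),('o',o),('n',n)]).modify 'o' 0
          (fun v => PySem.Int.floordiv v 2))
        = PySem.Dict.mk [('b',b),('a',a),('l',ll),('o',PySem.Int.floordiv o 2),('n',n)] from by
      intro b a ll o n
      simp [PySem.Dict.modify, PySem.Dict.insert, PySem.Dict.getD, PySem.Dict.get?]]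
  simp only [PySem.Dict.values, List.map]
  rw [PySem.List.min?_id_cons]
  rw [show PySem.Int.floordiv (text.toList.count 'l' : Int) 2
        = ((text.toList.count 'l' / 2 : Nat) : Int) from by
      exact_mod_cast PySem.Int.floordiv_natCast (text.toList.count 'l') 2]
  rw [show PySem.Int.floordiv (text.toList.count 'o' : Int) 2
        = ((text.toList.count 'o' / 2 : Nat) : Int) from by
      exact_mod_cast PySem.Int.floordiv_natCast (text.toList.count 'o') 2]
  simp only [List.foldl, pvM]
  push_cast
  rfl

-- the feasibility test decides 'k ≤ pvM'.
theorem pvCan_iff (text : String) (k : Int) :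
    pvCan text k = true ↔ k ≤ (pvM text.toList : Int) := by
  unfold pvCan
  rw [show PySem.Str.count text "b" = text.toList.count 'b' from pvCount_single text 'b',
      show PySem.Str.count text "a" = text.toList.count 'a' from pvCount_single text 'a',
      show PySem.Str.count text "l" = text.toList.count 'l' from pvCount_single text 'l',
      show PySem.Str.count text "o" = text.toList.count 'o' from pvCount_single text 'o',
      show PySem.Str.count text "n" = text.toList.count 'n' from pvCount_single text 'n']
  simp only [Bool.and_eq_true, decide_eq_true_eq, ge_iff_le, pvM]
  push_cast
  simp only [le_min_iff]
  omega

-- the binary-search loop homes in on m whenever lo ≤ m ≤ hi.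
theorem pvSearch_eq (text : String) (m : Int) (hm : ∀ k, pvCan text k = true ↔ k ≤ m) :
    ∀ (n : ℕ) (lo hi : Int), (hi - lo).toNat = n → lo ≤ m → m ≤ hi → pvSearch text lo hi = m := by
  intro n
  induction n using Nat.strong_induction_on with
  | _ n ih =>
    intro lo hi hn h1 h2
    rw [pvSearch]
    by_cases h : lo < hi
    · rw [dif_pos h]
      have hmid := pvMid_bounds h
      by_cases hc : pvCan text (PySem.Int.floordiv (lo + hi + 1) 2) = true
      · rw [if_pos hc]
        exact ih (hi - PySem.Int.floordiv (lo + hi + 1) 2).toNat (by omega) _ _ rfl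
          ((hm _).mp hc) h2
      · rw [if_neg hc]
        have : ¬ (PySem.Int.floordiv (lo + hi + 1) 2 ≤ m) := fun hh => hc ((hm _).mpr hh)
        exact ih (PySem.Int.floordiv (lo + hi + 1) 2 - 1 - lo).toNat (by omega) _ _ rfl
          h1 (by omega)
    · rw [dif_neg h]
      omega

-- the five relevant counts never exceed the length.
theorem pvCounts_le (l : List Char) :
    l.count 'b' + l.count 'a' + l.count 'l' + l.count 'o' + l.count 'n' ≤ l.length := by
  induction l with
  | nil => simp
  | cons x t ih =>
    simp only [List.count_cons, List.length_cons]
    by_cases h1 : x = 'b'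
    · subst h1; simp; omega
    · by_cases h2 : x = 'a'
      · subst h2; simp; omega
      · by_cases h3 : x = 'l'
        · subst h3; simp; omega
        · by_cases h4 : x = 'o'
          · subst h4; simp; omega
          · by_cases h5 : x = 'n'
            · subst h5; simp; omega
            · simp [h1, h2, h3, h4, h5]; omega

-- B returns the min formula too.
theorem pvB_eq (text : String) : maxNumberOfBalloons_alt text = (pvM text.toList : Int) := by
  unfold maxNumberOfBalloons_alt
  have hlen : PySem.Int.floordiv (PySem.Str.len text) 7
      = ((text.toList.length / 7 : Nat) : Int) := by
    rw [show PySem.Str.len text = (text.toList.length : Int) from by simp [PySem.Str.len]]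
    exact_mod_cast PySem.Int.floordiv_natCast text.toList.length 7
  have hc := pvCounts_le text.toList
  have hM : pvM text.toList ≤ text.toList.length / 7 := by
    unfold pvM
    simp only [min_le_iff, le_min_iff] at *
    omega
  rw [hlen]
  exact pvSearch_eq text _ (pvCan_iff text) _ 0 _ rfl (by positivity) (by exact_mod_cast hM)

-- ===== VERDICT (by name: the statement is the Claim_ definition above) =====
theorem maxNumberOfBalloons_spec : Claim_equal_maxNumberOfBalloons := by
  intro text _
  unfold Spec_maxNumberOfBalloons
  rw [pvA_eq, pvB_eq]
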